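-- pv_equiv track=rewrite | github.com/Ricardo-Kaminski/qfeng_validation | src/qfeng/e5_symbolic/scenario_loader.py | _strip_constraints
-- ===== SOURCE A (Python) =====
-- def _strip_constraints(src: str) -> str:
--     """Remove integrity constraints (:- body.) to get relaxed program.
--
--     Handles multi-line constraints: once a line starts with ':-' (integrity
--     constraint, no head), all continuation lines until the closing '.' are
--     also commented out.
--     """
--     lines = []
--     in_constraint = False
--     for line in src.splitlines():
--         stripped = line.strip()
--         # Detect start of integrity constraint (no head before :-)
--         if not in_constraint and stripped.startswith(":-"):
--             in_constraint = True
--         if in_constraint: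
--             lines.append(f"% [relaxed] {line}")
--             # Constraint ends when the line contains a terminating period
--             # (not inside a string — simple heuristic sufficient for our corpus)
--             code_part = stripped.split("%")[0]  # strip inline comments
--             if code_part.rstrip().endswith("."):
--                 in_constraint = False
--         else:
--             lines.append(line)
--     return "\n".join(lines)
-- ===== SOURCE B (Python) =====
-- def _ends_stmt(line):
--     return line.strip().split("%")[0].rstrip().endswith(".")
--
--
-- def _strip_constraints(src: str) -> str:
--     """Block-at-a-time: at a ':-' line, locate the terminating '.' line by
--     searching forward, bulk-comment the whole slice, and jump past it."""
--     lines = src.splitlines()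
--     out = []
--     i = 0
--     while i < len(lines):
--         if lines[i].strip().startswith(":-"):
--             j = next((k for k in range(i, len(lines)) if _ends_stmt(lines[k])),
--                      len(lines) - 1)
--             out += ["% [relaxed] " + l for l in lines[i:j + 1]]
--             i = j + 1
--         else:
--             out.append(lines[i])
--             i += 1
--     return "\n".join(out)
-- ===== Notes on version B (the rewrite author's own statement) =====
-- stated objective: alternative
-- what changed: Replaces A's per-line state machine (an in_constraint flag threaded through one loop) with block-at-a-time processing: at a constraint-start line B searches forward for the index of the terminating line, bulk-comments that whole slice with a comprehension, and jumps the scan index past the block.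
import Mathlib
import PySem

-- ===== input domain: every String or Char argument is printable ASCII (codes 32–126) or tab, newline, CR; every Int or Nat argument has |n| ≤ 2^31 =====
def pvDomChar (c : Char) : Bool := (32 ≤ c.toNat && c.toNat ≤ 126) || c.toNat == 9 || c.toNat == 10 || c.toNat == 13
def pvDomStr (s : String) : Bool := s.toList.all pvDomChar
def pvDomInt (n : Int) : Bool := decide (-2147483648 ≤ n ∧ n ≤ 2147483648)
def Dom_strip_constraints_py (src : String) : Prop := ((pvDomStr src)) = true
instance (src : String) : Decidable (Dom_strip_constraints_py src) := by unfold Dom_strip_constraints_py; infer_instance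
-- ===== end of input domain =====

-- B replaces A's per-line state machine by block-at-a-time processing: it searches
-- forward for the terminating '.' line and bulk-comments the slice (alternative, same cost).

-- ===== PORT A =====
-- one iteration of A's for-loop; state = (lines, in_constraint).
-- 'stripped.split("%")[0]': split by a nonempty separator never yields [], so [0] is headD "".
def stepA_strip (st : List String × Bool) (line : String) : List String × Bool :=
  let stripped := PySem.Str.strip line
  let in_constraint :=
    if !st.2 && PySem.Str.startswith stripped ":-" then true else st.2
  if in_constraint then
    let code_part := ((PySem.Str.split? stripped "%").getD []).headD ""
    (st.1 ++ ["% [relaxed] " ++ line],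
     !(PySem.Str.endswith (PySem.Str.rstrip code_part) "."))
  else
    (st.1 ++ [line], in_constraint)

def strip_constraints_py (src : String) : String :=
  PySem.Str.join "\n" ((PySem.Str.splitlines src).foldl stepA_strip ([], false)).1

-- ===== PORT B =====
-- Source B's _ends_stmt
def bEnds_strip (line : String) : Bool :=
  PySem.Str.endswith
    (PySem.Str.rstrip (((PySem.Str.split? (PySem.Str.strip line) "%").getD []).headD "")) "."

-- Source B's while loop over the line index, here structural recursion on the suffix
-- lines[i:]; 'next((k for k in range(i,len) if _ends_stmt ...), len-1)' is the
-- first-match search findIdx? with default (length - 1), and the bulk comment of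
-- lines[i:j+1] is map over take (j - i + 1).
def bGo_strip : List String → List String
  | [] => []
  | line :: rest =>
    if PySem.Str.startswith (PySem.Str.strip line) ":-" then
      let ls := line :: rest
      let j := (ls.findIdx? bEnds_strip).getD (ls.length - 1)
      (ls.take (j + 1)).map (fun l => "% [relaxed] " ++ l) ++ bGo_strip (ls.drop (j + 1))
    else
      line :: bGo_strip rest
termination_by l => l.length
decreasing_by all_goals (simp; try omega)

def strip_constraints_py_alt (src : String) : String :=
  PySem.Str.join "\n" (bGo_strip (PySem.Str.splitlines src))

-- ===== PRECONDITION & SPEC =====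
def Spec_strip_constraints_py (src : String) (out : String) : Prop := out = strip_constraints_py_alt src
instance (src : String) (out : String) : Decidable (Spec_strip_constraints_py src out) := by unfold Spec_strip_constraints_py; infer_instance

-- ===== CLAIM =====
def Claim_equal_strip_constraints_py : Prop := ∀ (src : String), Dom_strip_constraints_py src → Spec_strip_constraints_py src (strip_constraints_py src)

-- ===== LEMMAS AND PROOFS =====

-- A's fold in constraint mode consumes the block up to the first terminating line
-- (or everything, if none terminates) and then resumes in normal mode.
theorem foldA_true (ls : List String) : ∀ acc,
    ls.foldl stepA_strip (acc, true) =
      match ls.findIdx? bEnds_strip with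
      | some k => (ls.drop (k + 1)).foldl stepA_strip
          (acc ++ (ls.take (k + 1)).map (fun l => "% [relaxed] " ++ l), false)
      | none => (acc ++ ls.map (fun l => "% [relaxed] " ++ l), true) := by
  induction ls with
  | nil => intro acc; simp
  | cons x xs ih =>
    intro acc
    by_cases he : bEnds_strip x = true
    · have hstep : stepA_strip (acc, true) x = (acc ++ ["% [relaxed] " ++ x], false) := by
        simp [stepA_strip, bEnds_strip] at he ⊢
        simp [he]
      simp [List.findIdx?_cons, he, hstep]
    · have hstep : stepA_strip (acc, true) x = (acc ++ ["% [relaxed] " ++ x], true) := by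
        simp [stepA_strip, bEnds_strip] at he ⊢
        simp [he]
      rw [List.foldl_cons, hstep, ih]
      simp [List.findIdx?_cons, he]
      cases hfi : xs.findIdx? bEnds_strip with
      | some k => simp
      | none => simp

-- A's fold in normal mode computes bGo_strip (strong induction on the length).
theorem foldA_false (n : Nat) : ∀ (ls : List String), ls.length ≤ n → ∀ acc,
    (ls.foldl stepA_strip (acc, false)).1 = acc ++ bGo_strip ls := by
  induction n with
  | zero =>
    intro ls hlen acc
    have : ls = [] := List.eq_nil_of_length_eq_zero (Nat.le_zero.mp hlen)
    simp [this, bGo_strip]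
  | succ n ih =>
    intro ls hlen acc
    match ls with
    | [] => simp [bGo_strip]
    | x :: xs =>
      by_cases hs : PySem.Str.startswith (PySem.Str.strip x) ":-" = true
      · -- entering a constraint: the first step behaves as in constraint mode
        have hsC : PySem.Chars.startswith (PySem.Chars.strip x.toList) [':', '-'] = true := by
          simpa using hs
        have hstep : ∀ a : List String, stepA_strip (a, false) x = stepA_strip (a, true) x := by
          intro a; simp [stepA_strip, hsC]
        rw [List.foldl_cons, hstep, ← List.foldl_cons, foldA_true (x :: xs) acc]
        rw [bGo_strip]
        simp only [hs, if_pos]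
        cases hfi : (x :: xs).findIdx? bEnds_strip with
        | some k =>
          have hd : ((x :: xs).drop (k + 1)).length ≤ n := by
            simp at hlen ⊢; omega
          rw [ih _ hd]
          simp
        | none =>
          have hlen1 : (x :: xs).length - 1 + 1 = (x :: xs).length := by simp
          simp only [Option.getD_none, hlen1, List.take_length, List.drop_length,
            bGo_strip, List.append_nil]
      · have hsC : PySem.Chars.startswith (PySem.Chars.strip x.toList) [':', '-'] = false := by
          simpa using hs
        have hstep : stepA_strip (acc, false) x = (acc ++ [x], false) := by
          simp [stepA_strip, hsC]
        rw [List.foldl_cons, hstep, ih xs (by simpa using Nat.lt_succ_iff.mp (by simpa using hlen)) (acc ++ [x])]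
        rw [bGo_strip]
        simp [hsC]

-- ===== VERDICT =====
theorem strip_constraints_py_spec : Claim_equal_strip_constraints_py := by
  intro src _
  unfold Spec_strip_constraints_py strip_constraints_py strip_constraints_py_alt
  rw [foldA_false (PySem.Str.splitlines src).length _ le_rfl []]
  simp
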